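-- pv_equiv track=rewrite | github.com/orikam/advantcoding_2022 | day8/d8q1.py | build_visable_map_right
-- ===== SOURCE A (Python) =====
-- def build_visable_map_right(in_map):
--     v_map = []
--     for j in range(len(in_map)):
--         max_value = -1
--         raw = []
--         for i in range(len(in_map[0])-1, -1, -1):
--             if in_map[j][i] > max_value:
--                 max_value = in_map[j][i]
--                 raw.insert(0, 1)
--             else:
--                 raw.insert(0, 0)
--         v_map.append(raw)
--     return v_map
-- ===== SOURCE B (Python) =====
-- def build_visable_map_right(in_map):
--     if not in_map:
--         return []
--     w = len(in_map[0])
--     v_map = []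
--     for row in in_map:
--         # pass 1: suffix-maximum table, suff[k] = max(row[k:w]) floored at -1
--         suff = [-1]
--         for i in range(w - 1, -1, -1):
--             suff.insert(0, max(row[i], suff[0]))
--         # pass 2: compare each cell against the maximum strictly to its right
--         v_map.append([1 if row[i] > suff[i + 1] else 0 for i in range(w)])
--     return v_map
-- ===== Notes on version B (the rewrite author's own statement) =====
-- stated objective: alternative
-- what changed: Replaces the interleaved right-to-left running-max scan that prepends bits into one accumulator with two distinct passes per row: first a suffix-maximum table (floored at -1) built right-to-left, then a left-to-right comprehension comparing each cell against the table.
import Mathlib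
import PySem

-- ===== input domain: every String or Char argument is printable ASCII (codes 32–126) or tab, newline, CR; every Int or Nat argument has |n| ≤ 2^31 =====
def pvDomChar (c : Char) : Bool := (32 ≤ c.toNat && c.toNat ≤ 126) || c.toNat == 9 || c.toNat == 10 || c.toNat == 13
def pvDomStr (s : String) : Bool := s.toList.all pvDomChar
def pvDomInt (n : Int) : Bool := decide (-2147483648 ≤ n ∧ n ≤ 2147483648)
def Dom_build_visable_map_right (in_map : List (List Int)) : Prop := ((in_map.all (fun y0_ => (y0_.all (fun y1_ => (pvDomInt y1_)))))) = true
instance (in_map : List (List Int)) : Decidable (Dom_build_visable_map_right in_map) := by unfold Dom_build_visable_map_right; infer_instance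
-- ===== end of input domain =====

-- B computes the same visibility rows by two distinct passes (suffix-max table, then comparison) instead of A's single interleaved running-max scan; same cost (objective: alternative). 

-- ===== PORT A =====
def build_visable_map_right (in_map : List (List Int)) : List (List Int) :=
  (PySem.List.pyRange 0 in_map.length 1).foldl (fun v_map j =>
    v_map ++ [((PySem.List.pyRange (((PySem.List.pyGetD in_map 0 []).length : Int) - 1) (-1) (-1)).foldl
      (fun (st : Int × List Int) i =>
        if PySem.List.pyGetD (PySem.List.pyGetD in_map j []) i 0 > st.1 then
          (PySem.List.pyGetD (PySem.List.pyGetD in_map j []) i 0, 1 :: st.2)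
        else (st.1, 0 :: st.2)) (-1, ([] : List Int))).2]) []

-- ===== PORT B =====
-- helper: one row of B (suffix-max pass, then comparison pass)
def pvAltRow (w : Nat) (row : List Int) : List Int :=
  let suff := (PySem.List.pyRange ((w : Int) - 1) (-1) (-1)).foldl
    (fun (s : List Int) i => max (PySem.List.pyGetD row i 0) (PySem.List.pyGetD s 0 0) :: s) [-1]
  (PySem.List.pyRange 0 (w : Int) 1).map
    (fun i => if PySem.List.pyGetD row i 0 > PySem.List.pyGetD suff (i + 1) 0 then 1 else 0)

def build_visable_map_right_alt (in_map : List (List Int)) : List (List Int) :=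
  match in_map with
  | [] => []
  | first :: _ => in_map.map (pvAltRow first.length)

-- ===== PRECONDITION & SPEC =====
-- Pre_ excludes exactly the ragged grids on which Python A raises IndexError
-- (some row shorter than the first row); B raises there as well.
def Pre_build_visable_map_right (in_map : List (List Int)) : Prop :=
  ∀ row ∈ in_map, (in_map.headD []).length ≤ row.length
instance (in_map : List (List Int)) : Decidable (Pre_build_visable_map_right in_map) := by
  unfold Pre_build_visable_map_right; infer_instance

def pvWitness_build_visable_map_right : List (List Int) := [[3, 0, 3], [2, 5, 5]]

def Spec_build_visable_map_right (in_map : List (List Int)) (out : List (List Int)) : Prop := out = build_visable_map_right_alt in_map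
instance (in_map : List (List Int)) (out : List (List Int)) : Decidable (Spec_build_visable_map_right in_map out) := by unfold Spec_build_visable_map_right; infer_instance

-- ===== CLAIM (what is proved, stated in full; the proofs are below) =====
def Claim_equal_build_visable_map_right : Prop := ∀ (in_map : List (List Int)), Dom_build_visable_map_right in_map → Pre_build_visable_map_right in_map → Spec_build_visable_map_right in_map (build_visable_map_right in_map)

-- ===== LEMMAS AND PROOFS =====

-- reference recursion for A's interleaved scan: running max processed right-to-left
def pvVisA : List Int → Int → Int × List Int
  | [], m => (m, [])
  | x :: xs, m =>
      let p := pvVisA xs m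
      (if x > p.1 then x else p.1, (if x > p.1 then 1 else 0) :: p.2)

-- reference recursion for B's suffix table
def pvVisB : List Int → List Int → List Int
  | [], s => s
  | x :: xs, s =>
      let t := pvVisB xs s
      max x (PySem.List.pyGetD t 0 0) :: t

theorem pvA_fold (row : List Int) (d : Nat) : ∀ (a : Nat), a + d ≤ row.length → ∀ (m : Int) (r : List Int),
    (PySem.List.pyRange (a : Int) ((a : Int) + (d : Int)) 1).foldr
        (fun (i : Int) (st : Int × List Int) =>
          if PySem.List.pyGetD row i 0 > st.1 then (PySem.List.pyGetD row i 0, 1 :: st.2)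
          else (st.1, 0 :: st.2)) (m, r)
      = ((pvVisA ((row.drop a).take d) m).1, (pvVisA ((row.drop a).take d) m).2 ++ r) := by
  induction d with
  | zero =>
      intro a h m r
      simp [pvVisA]
  | succ d ih =>
      intro a h m r
      have ha : a < row.length := by omega
      rw [PySem.List.pyRange_one_cons (by push_cast; omega : (a:Int) < (a:Int) + ((d+1 : Nat) : Int))]
      have hrest : (PySem.List.pyRange ((a:Int)+1) ((a:Int) + ((d+1:Nat) : Int)) 1)
          = PySem.List.pyRange ((a+1 : Nat) : Int) (((a+1 : Nat) : Int) + (d : Int)) 1 := by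
        push_cast; ring_nf
      rw [List.foldr_cons, hrest, ih (a+1) (by omega) m r]
      rw [List.drop_eq_getElem_cons ha]
      simp only [List.take_succ_cons, pvVisA, PySem.List.pyGetD_natCast,
        List.getD_eq_getElem?_getD, List.getElem?_eq_getElem ha, Option.getD_some]
      split_ifs <;> simp

theorem pvB_fold (row : List Int) (d : Nat) : ∀ (a : Nat), a + d ≤ row.length → ∀ (s : List Int),
    (PySem.List.pyRange (a : Int) ((a : Int) + (d : Int)) 1).foldr
        (fun (i : Int) (s : List Int) => max (PySem.List.pyGetD row i 0) (PySem.List.pyGetD s 0 0) :: s) s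
      = pvVisB ((row.drop a).take d) s := by
  induction d with
  | zero =>
      intro a h s
      simp [pvVisB]
  | succ d ih =>
      intro a h s
      have ha : a < row.length := by omega
      rw [PySem.List.pyRange_one_cons (by push_cast; omega : (a:Int) < (a:Int) + ((d+1 : Nat) : Int))]
      have hrest : (PySem.List.pyRange ((a:Int)+1) ((a:Int) + ((d+1:Nat) : Int)) 1)
          = PySem.List.pyRange ((a+1 : Nat) : Int) (((a+1 : Nat) : Int) + (d : Int)) 1 := by
        push_cast; ring_nf
      rw [List.foldr_cons, hrest, ih (a+1) (by omega) s, List.drop_eq_getElem_cons ha,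
        List.take_succ_cons]
      simp only [pvVisB, PySem.List.pyGetD_natCast, List.getD_eq_getElem?_getD,
        List.getElem?_eq_getElem ha, Option.getD_some]

theorem pvB_head (l : List Int) :
    PySem.List.pyGetD (pvVisB l [-1]) 0 0 = (pvVisA l (-1)).1 := by
  induction l with
  | nil => simp [pvVisB, pvVisA, PySem.List.pyGetD_zero_cons]
  | cons x xs ih =>
      simp only [pvVisB, pvVisA, PySem.List.pyGetD_zero_cons, ih]
      split_ifs with h <;> omega

theorem pvMain (l : List Int) :
    (pvVisA l (-1)).2 = (List.range l.length).map
      (fun k => if l.getD k 0 > (pvVisB l [-1]).getD (k+1) 0 then 1 else 0) := by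
  induction l with
  | nil => simp [pvVisA]
  | cons x xs ih =>
      have hhead : (pvVisB (x :: xs) [-1]).getD 1 0 = (pvVisA xs (-1)).1 := by
        have h := pvB_head xs
        simp only [PySem.List.pyGetD_zero] at h
        simpa [pvVisB] using h
      simp only [pvVisA, List.length_cons, List.range_succ_eq_map, List.map_cons, List.map_map]
      refine congrArg₂ List.cons ?_ ?_
      · have hhead' : (pvVisB (x :: xs) [-1])[1]?.getD 0 = (pvVisA xs (-1)).1 := by
          simpa [List.getD_eq_getElem?_getD] using hhead
        simp [hhead']
      · rw [ih]
        refine List.map_congr_left (fun k hk => ?_)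
        simp [pvVisB, Function.comp]

theorem pvRange_countdown (n : Nat) :
    PySem.List.pyRange ((n : Int) - 1) (-1) (-1) = (PySem.List.pyRange 0 (n : Int) 1).reverse := by
  rw [PySem.List.pyRange_neg_one_eq_reverse]
  norm_num

theorem pvAltRow_eq (row : List Int) (n : Nat) (h : n ≤ row.length) :
    pvAltRow n row = (pvVisA (row.take n) (-1)).2 := by
  unfold pvAltRow
  rw [pvRange_countdown]
  simp only [List.foldl_reverse]
  have hb := pvB_fold row n 0 (by omega) [-1]
  simp only [Nat.cast_zero, zero_add, List.drop_zero] at hb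
  rw [hb, pvMain (row.take n)]
  have hlen : (row.take n).length = n := by simp [Nat.min_eq_left h]
  rw [hlen]
  rw [PySem.List.pyRange_one 0 (n : Int)]
  simp only [Int.sub_zero, Int.toNat_natCast, List.map_map]
  refine List.map_congr_left (fun k hk => ?_)
  have hk' : k < n := List.mem_range.mp hk
  have hget : row.getD k 0 = (row.take n).getD k 0 := by
    simp [List.getD_eq_getElem?_getD, hk']
  simp only [Function.comp, Int.zero_add]
  rw [show ((k : Int) + 1) = ((k + 1 : Nat) : Int) by push_cast; ring,
    PySem.List.pyGetD_natCast, PySem.List.pyGetD_natCast, hget]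

theorem pvOuterGen (xs : List (List Int)) (h : List Int → List Int) :
    (PySem.List.pyRange 0 (xs.length : Int) 1).map (fun j => h (PySem.List.pyGetD xs j [])) = xs.map h := by
  rw [PySem.List.pyRange_one 0 (xs.length : Int)]
  simp only [Int.sub_zero, Int.toNat_natCast, List.map_map]
  induction xs with
  | nil => simp
  | cons y ys ih =>
      simp only [List.length_cons, List.range_succ_eq_map, List.map_cons, List.map_map]
      refine congrArg₂ List.cons (by simp) ?_
      rw [← ih]
      refine List.map_congr_left (fun k hk => ?_)
      simp only [Function.comp]
      refine congrArg h ?_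
      simp only [Nat.succ_eq_add_one, zero_add]
      rw [PySem.List.pyGetD_natCast, PySem.List.pyGetD_natCast]
      simp [List.getD_eq_getElem?_getD]

theorem pvOuter (xs : List (List Int)) (w : Nat) :
    (PySem.List.pyRange 0 (xs.length : Int) 1).map (fun j =>
      ((PySem.List.pyRange ((w : Int) - 1) (-1) (-1)).foldl
        (fun (st : Int × List Int) i =>
          if PySem.List.pyGetD (PySem.List.pyGetD xs j []) i 0 > st.1 then
            (PySem.List.pyGetD (PySem.List.pyGetD xs j []) i 0, 1 :: st.2)
          else (st.1, 0 :: st.2)) (-1, ([] : List Int))).2)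
    = xs.map (fun row =>
      ((PySem.List.pyRange ((w : Int) - 1) (-1) (-1)).foldl
        (fun (st : Int × List Int) i =>
          if PySem.List.pyGetD row i 0 > st.1 then
            (PySem.List.pyGetD row i 0, 1 :: st.2)
          else (st.1, 0 :: st.2)) (-1, ([] : List Int))).2) :=
  pvOuterGen xs (fun row =>
      ((PySem.List.pyRange ((w : Int) - 1) (-1) (-1)).foldl
        (fun (st : Int × List Int) i =>
          if PySem.List.pyGetD row i 0 > st.1 then
            (PySem.List.pyGetD row i 0, 1 :: st.2)
          else (st.1, 0 :: st.2)) (-1, ([] : List Int))).2)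

-- ===== VERDICT (by name: the statement is the Claim_ definition above) =====
theorem build_visable_map_right_spec : Claim_equal_build_visable_map_right := by
  intro in_map _ hpre
  unfold Spec_build_visable_map_right
  cases in_map with
  | nil => rfl
  | cons first rest =>
      unfold build_visable_map_right
      rw [show build_visable_map_right_alt (first :: rest)
            = (first :: rest).map (pvAltRow first.length) from rfl]
      rw [PySem.List.foldl_append_singleton_eq_map]
      rw [pvOuter (first :: rest) (PySem.List.pyGetD (first :: rest) 0 []).length]
      simp only [List.nil_append]
      refine List.map_congr_left (fun row hrow => ?_)
      have hw : first.length ≤ row.length := by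
        have := hpre row hrow
        simpa using this
      have hfirst : PySem.List.pyGetD (first :: rest) 0 [] = first := PySem.List.pyGetD_zero_cons first rest []
      simp only [hfirst]
      rw [pvRange_countdown first.length]
      simp only [List.foldl_reverse]
      have ha := pvA_fold row first.length 0 (by omega) (-1) []
      simp only [Nat.cast_zero, zero_add, List.drop_zero] at ha
      rw [ha, pvAltRow_eq row first.length hw]
      simp
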